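-- pv_equiv track=rewrite | github.com/JetBrains-Research/ai-agents-code-editing | code_editing/utils/wandb_utils.py | chat_to_dict
-- ===== SOURCE A (Python) =====
-- from typing import List, Dict, Optional, Callable, Any
--
-- def chat_to_dict(
--         preprocessed_inputs: List[Dict[str, str]],
-- ) -> Dict[str, str]:
--     counters = {}
--     res = {}
--     for message in preprocessed_inputs:
--         if message["role"] == "system":
--             key = "system"
--         else:
--             i = counters.get(message["role"], 0)
--             counters[message["role"]] = i + 1
--             key = f"{message['role']}_{i}"
--         res[key] = message["content"]
--     return res
-- ===== SOURCE B (Python) =====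
-- def chat_to_dict(preprocessed_inputs):
--     def key_for(position, message):
--         role = message["role"]
--         if role == "system":
--             return "system"
--         seen = sum(1 for m in preprocessed_inputs[:position] if m["role"] == role)
--         return f"{role}_{seen}"
--     return dict(
--         (key_for(p, m), m["content"]) for p, m in enumerate(preprocessed_inputs)
--     )
-- ===== Notes on version B (the rewrite author's own statement) =====
-- stated objective: alternative
-- what changed: Replaces A's stateful counters-dict with dict mutation inside the loop by a stateless per-position key closed form (each non-system key's index is the count of that role in the prefix msgs[:p]) feeding a single dict() over generated (key, content) pairs; Pre_ excludes only messages missing a 'role' or 'content' key, where A (and B) raise KeyError.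
import Mathlib
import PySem

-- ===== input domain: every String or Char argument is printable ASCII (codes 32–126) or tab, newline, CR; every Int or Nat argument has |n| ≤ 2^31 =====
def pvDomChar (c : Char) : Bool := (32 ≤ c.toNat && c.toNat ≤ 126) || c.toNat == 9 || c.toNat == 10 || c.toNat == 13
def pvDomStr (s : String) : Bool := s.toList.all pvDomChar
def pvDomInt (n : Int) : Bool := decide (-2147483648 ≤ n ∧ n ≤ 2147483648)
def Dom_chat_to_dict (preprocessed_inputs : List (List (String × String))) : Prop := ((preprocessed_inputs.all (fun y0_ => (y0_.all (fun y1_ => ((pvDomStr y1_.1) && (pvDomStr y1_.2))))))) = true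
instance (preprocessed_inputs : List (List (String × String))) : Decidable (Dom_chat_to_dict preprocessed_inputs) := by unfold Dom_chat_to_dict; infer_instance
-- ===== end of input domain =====

-- B replaces A's stateful counters-dict loop by a stateless per-position key (prefix counts)
-- feeding a single dict construction (same return value; objective: alternative decomposition).


-- ===== PORT A =====
-- each message is a Python dict: lookup is first-match; message["role"]/["content"] exist under Pre_
def chat_to_dict (preprocessed_inputs : List (List (String × String))) : List (String × String) :=
  (preprocessed_inputs.foldl
    (fun (st : PySem.Dict String Int × PySem.Dict String String) message =>
      if PySem.Dict.getD (PySem.Dict.mk message) "role" "" == "system" then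
        (st.1, st.2.insert "system" (PySem.Dict.getD (PySem.Dict.mk message) "content" ""))
      else
        let role := PySem.Dict.getD (PySem.Dict.mk message) "role" ""
        let i := st.1.getD role 0
        (st.1.insert role (i + 1),
         st.2.insert (role ++ "_" ++ PySem.Int.toStr i) (PySem.Dict.getD (PySem.Dict.mk message) "content" "")))
    (PySem.Dict.empty, PySem.Dict.empty)).2.items

-- ===== PORT B =====
-- 'sum(1 for m in preprocessed_inputs[:position] if …)' is ported as filter-length over the slice;
-- 'dict(generator)' is the fold of insert over the generated pairs.
def chat_to_dict_alt (preprocessed_inputs : List (List (String × String))) : List (String × String) :=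
  ((PySem.List.enumerate preprocessed_inputs).foldl
    (fun (d : PySem.Dict String String) pm =>
      let role := PySem.Dict.getD (PySem.Dict.mk pm.2) "role" ""
      let key := if role == "system" then "system"
        else role ++ "_" ++ PySem.Int.toStr
          (((PySem.List.slice preprocessed_inputs none (some pm.1)).filter
              (fun m => PySem.Dict.getD (PySem.Dict.mk m) "role" "" == role)).length : Int)
      d.insert key (PySem.Dict.getD (PySem.Dict.mk pm.2) "content" ""))
    PySem.Dict.empty).items

-- ===== PRECONDITION & SPEC =====
-- Pre_ excludes exactly the messages on which Python A raises KeyError: a message missing a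
-- "role" or a "content" key (B raises there too).
def Pre_chat_to_dict (preprocessed_inputs : List (List (String × String))) : Prop :=
  (preprocessed_inputs.all
    (fun m => (m.map Prod.fst).contains "role" && (m.map Prod.fst).contains "content")) = true
instance (preprocessed_inputs : List (List (String × String))) : Decidable (Pre_chat_to_dict preprocessed_inputs) := by unfold Pre_chat_to_dict; infer_instance
def pvWitness_chat_to_dict : (List (List (String × String))) := []
def Spec_chat_to_dict (preprocessed_inputs : List (List (String × String))) (out : List (String × String)) : Prop := out = chat_to_dict_alt preprocessed_inputs
instance (preprocessed_inputs : List (List (String × String))) (out : List (String × String)) : Decidable (Spec_chat_to_dict preprocessed_inputs out) := by unfold Spec_chat_to_dict; infer_instance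

-- ===== CLAIM (what is proved, stated in full; the proofs are below) =====
def Claim_equal_chat_to_dict : Prop := ∀ (preprocessed_inputs : List (List (String × String))), Dom_chat_to_dict preprocessed_inputs → Pre_chat_to_dict preprocessed_inputs → Spec_chat_to_dict preprocessed_inputs (chat_to_dict preprocessed_inputs)

-- ===== LEMMAS AND PROOFS =====

-- abbreviations for the two field lookups
def pvRole (m : List (String × String)) : String := PySem.Dict.getD (PySem.Dict.mk m) "role" ""
def pvCont (m : List (String × String)) : String := PySem.Dict.getD (PySem.Dict.mk m) "content" ""
-- A's fold step and state
def pvStepA (st : PySem.Dict String Int × PySem.Dict String String) (message : List (String × String)) :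
    PySem.Dict String Int × PySem.Dict String String :=
  if pvRole message == "system" then
    (st.1, st.2.insert "system" (pvCont message))
  else
    (st.1.insert (pvRole message) (st.1.getD (pvRole message) 0 + 1),
     st.2.insert (pvRole message ++ "_" ++ PySem.Int.toStr (st.1.getD (pvRole message) 0)) (pvCont message))
def pvStA (xs : List (List (String × String))) : PySem.Dict String Int × PySem.Dict String String :=
  xs.foldl pvStepA (PySem.Dict.empty, PySem.Dict.empty)
-- the counters dict, closed form
def pvCnt (xs : List (List (String × String))) : PySem.Dict String Int :=
  ((xs.filter (fun m => !(pvRole m == "system"))).map pvRole).foldl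
    (fun d r => d.insert r (d.getD r 0 + 1)) PySem.Dict.empty
-- B's per-position key (with the full list L as parameter for the prefix slice) and its dict fold
def pvKey (L : List (List (String × String))) (p : Int) (m : List (String × String)) : String :=
  if pvRole m == "system" then "system"
  else pvRole m ++ "_" ++ PySem.Int.toStr
    (((PySem.List.slice L none (some p)).filter (fun x => pvRole x == pvRole m)).length : Int)
def pvDB (L : List (List (String × String))) : PySem.Dict String String :=
  (PySem.List.enumerate L).foldl
    (fun d pm => d.insert (pvKey L pm.1 pm.2) (pvCont pm.2)) PySem.Dict.empty

theorem pvCnt_count (xs : List (List (String × String))) (r : String) (hr : r ≠ "system") :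
    ((xs.filter (fun m => !(pvRole m == "system"))).map pvRole).count r
      = (xs.filter (fun x => pvRole x == r)).length := by
  induction xs with
  | nil => rfl
  | cons x xs ih =>
    by_cases hx : pvRole x = "system"
    · simp [hx, ih, Ne.symm hr]
    · by_cases hxr : pvRole x = r
      · simp [hxr, hr, ih]
      · simp [hx, hxr, ih]

theorem pvCnt_getD (xs : List (List (String × String))) (r : String) (hr : r ≠ "system") :
    (pvCnt xs).getD r 0 = ((xs.filter (fun x => pvRole x == r)).length : Int) := by
  unfold pvCnt
  rw [PySem.Dict.getD_foldl_insert_add_one]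
  rw [PySem.Dict.getD_empty]
  rw [pvCnt_count xs r hr]
  ring

theorem pvCnt_snoc (xs : List (List (String × String))) (m : List (String × String)) :
    pvCnt (xs ++ [m]) = if pvRole m == "system" then pvCnt xs
      else (pvCnt xs).insert (pvRole m) ((pvCnt xs).getD (pvRole m) 0 + 1) := by
  unfold pvCnt
  by_cases hm : pvRole m = "system"
  · rw [if_pos (by simp [hm])]
    rw [List.filter_append]
    simp [hm]
  · rw [if_neg (by simp [hm])]
    rw [List.filter_append]
    simp only [List.filter_cons, List.filter_nil]
    rw [if_pos (by simp [hm])]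
    simp [List.foldl_append]

theorem pvStA_snoc (xs : List (List (String × String))) (m : List (String × String)) :
    pvStA (xs ++ [m]) = pvStepA (pvStA xs) m := by
  unfold pvStA
  rw [List.foldl_append]
  rfl

theorem pvDB_snoc (xs : List (List (String × String))) (m : List (String × String)) :
    pvDB (xs ++ [m]) = (pvDB xs).insert
      (if pvRole m == "system" then "system"
       else pvRole m ++ "_" ++
         PySem.Int.toStr (((xs.filter (fun x => pvRole x == pvRole m)).length : Int)))
      (pvCont m) := by
  unfold pvDB
  rw [PySem.List.enumerate_append]
  rw [List.foldl_append]
  have hpre : (PySem.List.enumerate xs).foldl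
      (fun d pm => d.insert (pvKey (xs ++ [m]) pm.1 pm.2) (pvCont pm.2)) PySem.Dict.empty
      = (PySem.List.enumerate xs).foldl
      (fun d pm => d.insert (pvKey xs pm.1 pm.2) (pvCont pm.2)) PySem.Dict.empty := by
    apply PySem.List.foldl_congr_mem
    intro acc pm hmem
    rw [PySem.List.mem_enumerate_iff] at hmem
    obtain ⟨k, hk, hpm⟩ := hmem
    subst hpm
    unfold pvKey
    simp only [zero_add]
    rw [PySem.List.slice_to_natCast, PySem.List.slice_to_natCast,
        List.take_append_of_le_length (le_of_lt hk)]
  rw [hpre]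
  have hen : PySem.List.enumerate [m] (0 + (xs.length : Int)) = [((xs.length : Int), m)] := by
    simp [PySem.List.enumerate_cons, PySem.List.enumerate_nil]
  rw [hen]
  simp only [List.foldl_cons, List.foldl_nil]
  unfold pvKey
  rw [PySem.List.slice_to_natCast, List.take_left]

theorem pvInv (xs : List (List (String × String))) :
    (pvStA xs).1 = pvCnt xs ∧ (pvStA xs).2 = pvDB xs := by
  induction xs using List.reverseRecOn with
  | nil =>
    refine ⟨rfl, ?_⟩
    simp [pvStA, pvDB, PySem.List.enumerate_nil]
  | append_singleton xs m ih =>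
    obtain ⟨ih1, ih2⟩ := ih
    rw [pvStA_snoc, pvDB_snoc, pvCnt_snoc]
    unfold pvStepA
    by_cases hm : pvRole m = "system"
    · simp only [if_pos (by simp [hm] : (pvRole m == "system") = true)]
      exact ⟨ih1, by rw [ih2]⟩
    · simp only [if_neg (by simp [hm] : ¬ ((pvRole m == "system") = true))]
      refine ⟨by rw [ih1], ?_⟩
      rw [ih2, ih1, pvCnt_getD xs (pvRole m) hm]

-- ===== VERDICT (by name: the statement is the Claim_ definition above) =====
theorem chat_to_dict_spec : Claim_equal_chat_to_dict := by
  intro pi _ _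
  unfold Spec_chat_to_dict
  have hA : chat_to_dict pi = (pvStA pi).2.items := rfl
  have hB : chat_to_dict_alt pi = (pvDB pi).items := rfl
  rw [hA, hB, (pvInv pi).2]
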